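-- pv_equiv track=rewrite | github.com/lqh929289158/MagWrist_Software | MutiFinger_Backup.py | map_num_to_code
-- ===== SOURCE A (Python) =====
-- def map_num_to_code(num):
-- 	code = []
-- 	for i in range(5):
-- 		code.append(num>>i & 1)
-- 	code = code[::-1]
-- 	code.append(code[0])
-- 	code[0] = 0
-- 	if num==0:
-- 		code[0]=1
-- 	return code
-- ===== SOURCE B (Python) =====
-- # Precomputed 32-entry lookup table indexed by num % 32; built once by a divmod loop.
-- _T = []
-- for _i in range(32):
--     q = _i
--     row = []
--     for _ in range(5):
--         q, r = divmod(q, 2)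
--         row.append(r)          # bits LSB-first: b0..b4
--     _T.append([row[3], row[2], row[1], row[0], row[4]])
--
-- def map_num_to_code(num):
--     return [1 if num == 0 else 0] + _T[num % 32]
-- ===== Notes on version B (the rewrite author's own statement) =====
-- stated objective: alternative
-- what changed: Replaces A's per-call loop/reverse/append/index-overwrite with a lookup table over the five-bit residue of num, built once at module load by repeated divmod, so each call is a single table indexing plus the zero flag.
import Mathlib
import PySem

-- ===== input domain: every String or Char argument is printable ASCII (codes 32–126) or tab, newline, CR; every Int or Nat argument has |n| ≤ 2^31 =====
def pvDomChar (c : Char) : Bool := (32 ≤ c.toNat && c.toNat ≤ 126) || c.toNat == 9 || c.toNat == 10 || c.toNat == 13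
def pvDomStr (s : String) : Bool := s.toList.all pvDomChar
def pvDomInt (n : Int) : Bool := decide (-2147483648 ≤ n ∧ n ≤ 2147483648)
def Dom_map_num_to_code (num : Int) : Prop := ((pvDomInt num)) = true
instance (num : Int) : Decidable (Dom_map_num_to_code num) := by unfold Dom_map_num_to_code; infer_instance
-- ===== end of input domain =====

-- B replaces A's per-call loop/reverse/append/index-overwrite with a 32-entry table built once
-- by a divmod loop and a single lookup at num % 32 (objective: alternative).

-- ===== PORT A =====
def map_num_to_code (num : Int) : List Int :=
  -- for i in range(5): code.append(num>>i & 1)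
  let code : List Int :=
    (PySem.List.pyRange 0 5 1).foldl (fun c i => c ++ [PySem.Int.band (num >>> i.toNat) 1]) []
  -- code = code[::-1]   (full reverse slice, exact)
  let code := code.reverse
  -- code.append(code[0])  (index 0 is in range: the list has 5 elements)
  let code := code ++ [PySem.List.pyGetD code 0 0]
  -- code[0] = 0
  let code := code.set 0 0
  -- if num==0: code[0]=1
  if num = 0 then code.set 0 1 else code

-- ===== PORT B =====
-- module-level table: for _i in range(32), 5 divmod steps collect bits LSB-first, row scrambled
def bTable : List (List Int) :=
  (PySem.List.pyRange 0 32 1).foldl (fun t i =>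
    let st : Int × List Int :=
      (PySem.List.pyRange 0 5 1).foldl
        (fun st _ => (PySem.Int.floordiv st.1 2, st.2 ++ [PySem.Int.mod st.1 2])) (i, [])
    let row := st.2
    t ++ [[PySem.List.pyGetD row 3 0, PySem.List.pyGetD row 2 0, PySem.List.pyGetD row 1 0,
           PySem.List.pyGetD row 0 0, PySem.List.pyGetD row 4 0]]) []

def map_num_to_code_alt (num : Int) : List Int :=
  -- return [1 if num == 0 else 0] + _T[num % 32]
  [if num = 0 then (1 : Int) else 0] ++ PySem.List.pyGetD bTable (PySem.Int.mod num 32) []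

-- ===== PRECONDITION & SPEC =====
def Spec_map_num_to_code (num : Int) (out : List Int) : Prop := out = map_num_to_code_alt num
instance (num : Int) (out : List Int) : Decidable (Spec_map_num_to_code num out) := by unfold Spec_map_num_to_code; infer_instance

-- ===== CLAIM (what is proved, stated in full; the proofs are below) =====
def Claim_equal_map_num_to_code : Prop := ∀ (num : Int), Dom_map_num_to_code num → Spec_map_num_to_code num (map_num_to_code num)

-- ===== LEMMAS AND PROOFS =====

-- A's result for nonzero num, written as an explicit list of its five bits
theorem pvAeq (num : Int) (h : ¬ num = 0) : map_num_to_code num =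
    [0, PySem.Int.band (num >>> (3:Int)) 1, PySem.Int.band (num >>> (2:Int)) 1,
     PySem.Int.band (num >>> (1:Int)) 1, PySem.Int.band num 1,
     PySem.Int.band (num >>> (4:Int)) 1] := by
  unfold map_num_to_code
  rw [show PySem.List.pyRange 0 5 1 = [0,1,2,3,4] from by decide]
  simp only [List.foldl_cons, List.foldl_nil, List.nil_append, List.cons_append,
    List.reverse_cons, List.reverse_nil, PySem.List.pyGetD_zero_cons, List.set, if_neg h]
  norm_num
  simp only [show (0:Int) = ((0:Nat):Int) from rfl, Int.shiftRight_natCast_right,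
    Int.shiftRight_zero]

-- each of A's bits depends only on num % 32 (one lemma per bit position)
theorem pvBit1 (num : Int) :
    PySem.Int.band (num >>> (1:Int)) 1 = PySem.Int.band ((num % 32) >>> (1:Int)) 1 := by
  rw [PySem.Int.band_one, PySem.Int.band_one,
      PySem.Int.mod_eq_emod_of_pos (by norm_num : (0:Int) < 2),
      PySem.Int.mod_eq_emod_of_pos (by norm_num : (0:Int) < 2),
      show (1:Int) = ((1:Nat):Int) from rfl,
      Int.shiftRight_natCast_right, Int.shiftRight_natCast_right,
      Int.shiftRight_eq_div_pow, Int.shiftRight_eq_div_pow]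
  norm_num; omega

theorem pvBit2 (num : Int) :
    PySem.Int.band (num >>> (2:Int)) 1 = PySem.Int.band ((num % 32) >>> (2:Int)) 1 := by
  rw [PySem.Int.band_one, PySem.Int.band_one,
      PySem.Int.mod_eq_emod_of_pos (by norm_num : (0:Int) < 2),
      PySem.Int.mod_eq_emod_of_pos (by norm_num : (0:Int) < 2),
      show (2:Int) = ((2:Nat):Int) from rfl,
      Int.shiftRight_natCast_right, Int.shiftRight_natCast_right,
      Int.shiftRight_eq_div_pow, Int.shiftRight_eq_div_pow]
  norm_num; omega

theorem pvBit3 (num : Int) :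
    PySem.Int.band (num >>> (3:Int)) 1 = PySem.Int.band ((num % 32) >>> (3:Int)) 1 := by
  rw [PySem.Int.band_one, PySem.Int.band_one,
      PySem.Int.mod_eq_emod_of_pos (by norm_num : (0:Int) < 2),
      PySem.Int.mod_eq_emod_of_pos (by norm_num : (0:Int) < 2),
      show (3:Int) = ((3:Nat):Int) from rfl,
      Int.shiftRight_natCast_right, Int.shiftRight_natCast_right,
      Int.shiftRight_eq_div_pow, Int.shiftRight_eq_div_pow]
  norm_num; omega

theorem pvBit4 (num : Int) :
    PySem.Int.band (num >>> (4:Int)) 1 = PySem.Int.band ((num % 32) >>> (4:Int)) 1 := by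
  rw [PySem.Int.band_one, PySem.Int.band_one,
      PySem.Int.mod_eq_emod_of_pos (by norm_num : (0:Int) < 2),
      PySem.Int.mod_eq_emod_of_pos (by norm_num : (0:Int) < 2),
      show (4:Int) = ((4:Nat):Int) from rfl,
      Int.shiftRight_natCast_right, Int.shiftRight_natCast_right,
      Int.shiftRight_eq_div_pow, Int.shiftRight_eq_div_pow]
  norm_num; omega

theorem pvBit0 (num : Int) :
    PySem.Int.band num 1 = PySem.Int.band (num % 32) 1 := by
  rw [PySem.Int.band_one, PySem.Int.band_one,
      PySem.Int.mod_eq_emod_of_pos (by norm_num : (0:Int) < 2),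
      PySem.Int.mod_eq_emod_of_pos (by norm_num : (0:Int) < 2)]
  omega

-- ===== VERDICT (by name: the statement is the Claim_ definition above) =====
theorem map_num_to_code_spec : Claim_equal_map_num_to_code := by
  intro num _
  unfold Spec_map_num_to_code
  by_cases h : num = 0
  · subst h; decide
  · rw [pvAeq num h]
    unfold map_num_to_code_alt
    rw [PySem.Int.mod_eq_emod_of_pos (by norm_num : (0:Int) < 32),
        pvBit3 num, pvBit2 num, pvBit1 num, pvBit0 num, pvBit4 num, if_neg h]
    have h0 : 0 ≤ num % 32 := Int.emod_nonneg num (by norm_num)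
    have h1 : num % 32 < 32 := Int.emod_lt_of_pos num (by norm_num)
    generalize num % 32 = m at h0 h1
    interval_cases m <;> decide
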